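-- pv_equiv track=rewrite | github.com/mrugacz95/advent-of-code-2024 | day15/day15.py | parse
-- ===== SOURCE A (Python) =====
-- from typing import Optional, List, Tuple
--
-- ROBOT = "@"
--
-- EMPTY = "."
--
-- def parse(input_data) -> Tuple[List[List[chr]], str, Tuple[int, int]]:
--     store, moves = input_data.split("\n\n")
--     moves = moves.replace("\n", "")
--     store = [list(line) for line in store.split("\n")]
--
--     def find_robot():
--         for y, row in enumerate(store):
--             for x, row in enumerate(row):
--                 if row == ROBOT:
--                     store[y][x] = EMPTY
--                     return y, x
--
--     pos = find_robot()
--     return store, moves, pos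
-- ===== SOURCE B (Python) =====
-- def parse(input_data):
--     store_str, moves = input_data.split("\n\n")
--     moves = moves.replace("\n", "")
--     grid = [list(line) for line in store_str.split("\n")]
--     idx = store_str.find("@")
--     if idx == -1:
--         pos = None
--     else:
--         before = store_str[:idx]
--         y = before.count("\n")
--         x = len(before.split("\n")[-1])
--         pos = (y, x)
--         grid[y][x] = "."
--     return grid, moves, pos
-- ===== Notes on version B (the rewrite author's own statement) =====
-- stated objective: alternative
-- what changed: B locates the robot in the raw store string before building the grid (one flat find of the robot character, then y = newline count of the prefix and x = length of the prefix's last line), instead of A's nested enumerate scan over the already-built list-of-lists with in-place mutation during the search.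
import Mathlib
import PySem

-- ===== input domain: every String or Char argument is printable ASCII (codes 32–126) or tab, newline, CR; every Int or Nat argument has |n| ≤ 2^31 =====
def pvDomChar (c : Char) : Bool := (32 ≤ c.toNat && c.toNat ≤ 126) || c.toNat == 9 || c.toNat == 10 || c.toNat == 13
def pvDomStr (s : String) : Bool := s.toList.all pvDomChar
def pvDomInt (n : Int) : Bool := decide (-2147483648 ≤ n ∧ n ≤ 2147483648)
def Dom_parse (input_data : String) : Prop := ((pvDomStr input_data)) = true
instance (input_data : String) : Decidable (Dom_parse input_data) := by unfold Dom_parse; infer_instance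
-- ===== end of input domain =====

-- B locates the robot in the raw store string (flat find + newline counting on the prefix)
-- instead of A's nested scan over the built grid; return values proved equal wherever A returns.

-- ===== PORT A =====
-- inner loop: 'for x, row in enumerate(row): if row == ROBOT: …'
def pvFindInRow : List String → Nat → Option Nat
  | [], _ => none
  | c :: rest, x => if c == "@" then some x else pvFindInRow rest (x + 1)

-- outer loop of find_robot, with the in-place 'store[y][x] = EMPTY' carried as the rebuilt store
def pvFindRobot : List (List String) → Nat → List (List String) × Option (Nat × Nat)
  | [], _ => ([], none)
  | r :: rs, y =>
    match pvFindInRow r 0 with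
    | some x => ((r.set x ".") :: rs, some (y, x))
    | none =>
      let p := pvFindRobot rs (y + 1)
      (r :: p.1, p.2)

def parse (input_data : String) : List (List String) × String × (Option (Int × Int)) :=
  match PySem.Chars.splitOn input_data.toList ['\n', '\n'] with
  | [storeCs, movesCs] =>
    let moves := String.ofList (PySem.Chars.replace movesCs ['\n'] [])
    let store := (PySem.Chars.splitOn storeCs ['\n']).map (fun line => line.map (fun c => String.ofList [c]))
    match pvFindRobot store 0 with
    | (store', some (y, x)) => (store', moves, some ((y : Int), (x : Int)))
    | (store', none) => (store', moves, none)
  | _ => ([], "", none)  -- unreachable under Pre_parse (Python: ValueError on unpacking)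

-- ===== PORT B =====
def parse_alt (input_data : String) : List (List String) × String × (Option (Int × Int)) :=
  let parts := PySem.Chars.splitOn input_data.toList ['\n', '\n']
  -- the two-way unpacking ported as a length test + positional access (Python: ValueError unless exactly 2 parts)
  if parts.length = 2 then
    let storeCs := parts.headI
    let movesCs := (parts.drop 1).headI
    let moves := String.ofList (PySem.Chars.replace movesCs ['\n'] [])
    let grid := (PySem.Chars.splitOn storeCs ['\n']).map (fun line => line.map (fun c => String.ofList [c]))
    let idx := PySem.Chars.find storeCs ['@']
    if idx == -1 then (grid, moves, none)
    else
      let before := PySem.Chars.slice storeCs none (some idx)   -- store_str[:idx]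
      let y := PySem.Chars.count before ['\n']
      let x := ((PySem.List.pyGet? (PySem.Chars.splitOn before ['\n']) (-1)).getD []).length
                  -- [-1]: split never returns [], so pyGet? is always some
      (grid.modify y (fun row => row.set x "."), moves, some ((y : Int), (x : Int)))
  else ([], "", none)  -- unreachable under Pre_parse (Python: ValueError on unpacking)

-- ===== PRECONDITION & SPEC =====
-- Pre_ excludes exactly the inputs on which the initial two-way unpacking of the blank-line split
-- raises ValueError in Python (both A and B raise there): the split must yield exactly two parts.
def Pre_parse (input_data : String) : Prop :=
  (PySem.Chars.splitOn input_data.toList ['\n', '\n']).length = 2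
instance (input_data : String) : Decidable (Pre_parse input_data) := by unfold Pre_parse; infer_instance

def pvWitness_parse : String := "#.@\n#..\n\n<v>"

def Spec_parse (input_data : String) (out : List (List String) × String × (Option (Int × Int))) : Prop := out = parse_alt input_data
instance (input_data : String) (out : List (List String) × String × (Option (Int × Int))) : Decidable (Spec_parse input_data out) := by unfold Spec_parse; infer_instance

-- ===== CLAIM (what is proved, stated in full; the proofs are below) =====
def Claim_equal_parse : Prop := ∀ (input_data : String), Dom_parse input_data → Pre_parse input_data → Spec_parse input_data (parse input_data)

-- ===== LEMMAS AND PROOFS =====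

-- structural characterisation of splitting on a single newline
def srows : List Char → List (List Char)
  | [] => [[]]
  | c :: t =>
    if c = '\n' then [] :: srows t
    else
      match srows t with
      | [] => [[c]]
      | r :: rs => (c :: r) :: rs

-- structural characterisation of the first index of '@'
def sfind : List Char → Option Nat
  | [] => none
  | c :: t => if c = '@' then some 0 else (sfind t).map (· + 1)

-- A's row scan, on the char level: first row containing '@' and the index inside it
def rowFind : List (List Char) → Option (Nat × Nat)
  | [] => none
  | r :: rs =>
    match sfind r with
    | some x => some (0, x)
    | none => (rowFind rs).map (fun p => (p.1 + 1, p.2))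

def strRows (rows : List (List Char)) : List (List String) :=
  rows.map (fun line => line.map (fun c => String.ofList [c]))

-- B's coordinates, read off the flat prefix before index i
def gloc (s : List Char) (i : Nat) : Nat × Nat :=
  ((s.take i).count '\n', ((srows (s.take i)).getLast?.getD []).length)

theorem srows_ne_nil (s : List Char) : srows s ≠ [] := by
  cases s with
  | nil => simp [srows]
  | cons c t =>
    simp only [srows]
    split
    · simp
    · split <;> simp

theorem srows_length (s : List Char) : (srows s).length = s.count '\n' + 1 := by
  induction s with
  | nil => simp [srows]
  | cons c t ih =>
    simp only [srows]
    by_cases h : c = '\n'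
    · simp [h, ih]
    · cases hr : srows t with
      | nil => exact absurd hr (srows_ne_nil t)
      | cons r rs => simp [h, List.count_cons, ← ih, hr]

theorem srows_no_newline (s : List Char) (h : '\n' ∉ s) : srows s = [s] := by
  induction s with
  | nil => rfl
  | cons c t ih =>
    simp only [List.mem_cons, not_or] at h
    simp only [srows, if_neg (fun hh => h.1 (Eq.symm hh))]
    rw [ih h.2]

theorem splitOn_go_newline (fuel : Nat) (l cur : List Char) (acc : List (List Char))
    (h : l.length < fuel) :
    PySem.Chars.splitOn.go ['\n'] fuel l cur acc
      = acc.reverse ++ (srows l).modifyHead (cur.reverse ++ ·) := by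
  induction fuel generalizing l cur acc with
  | zero => omega
  | succ fuel ih =>
    cases l with
    | nil => simp [PySem.Chars.splitOn.go, srows]
    | cons c rest =>
      rw [PySem.Chars.splitOn.go]
      by_cases hc : c = '\n'
      · subst hc
        rw [if_pos (by simp [List.isPrefixOf])]
        simp only [List.length_cons] at h
        rw [ih _ _ _ (by simpa using h)]
        simp only [srows, if_pos rfl, List.reverse_cons, List.reverse_nil, List.nil_append,
          List.append_assoc, List.singleton_append, List.modifyHead]
        cases hr : srows rest with
        | nil => exact absurd hr (srows_ne_nil rest)
        | cons a l => simp [hr]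
      · rw [if_neg (by simp [List.isPrefixOf]; exact Ne.symm hc)]
        simp only [List.length_cons] at h
        rw [ih _ _ _ (by omega)]
        simp only [srows, if_neg hc]
        cases hr : srows rest with
        | nil => exact absurd hr (srows_ne_nil rest)
        | cons r rs => simp

theorem splitOn_eq_srows (s : List Char) : PySem.Chars.splitOn s ['\n'] = srows s := by
  rw [PySem.Chars.splitOn, splitOn_go_newline _ _ _ _ (by omega)]
  cases hr : srows s with
  | nil => exact absurd hr (srows_ne_nil s)
  | cons r rs => simp

theorem count_go_newline (fuel : Nat) (l : List Char) (acc : Nat) (h : l.length ≤ fuel) :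
    PySem.Chars.count.go ['\n'] fuel l acc = acc + l.count '\n' := by
  induction fuel generalizing l acc with
  | zero =>
    cases l with
    | nil => simp [PySem.Chars.count.go]
    | cons c rest => simp at h
  | succ fuel ih =>
    cases l with
    | nil => simp [PySem.Chars.count.go]
    | cons c rest =>
      rw [PySem.Chars.count.go]
      by_cases hc : c = '\n'
      · subst hc
        rw [if_pos (by simp [List.isPrefixOf])]
        simp only [List.length_cons] at h
        rw [ih _ _ (by simpa using h)]
        simp [List.count_cons]
        omega
      · rw [if_neg (by simp [List.isPrefixOf]; exact Ne.symm hc)]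
        simp only [List.length_cons] at h
        rw [ih _ _ (by omega)]
        simp [List.count_cons, hc]

theorem count_newline (l : List Char) : PySem.Chars.count l ['\n'] = l.count '\n' := by
  rw [PySem.Chars.count, if_neg (by simp), count_go_newline _ _ _ (le_refl _)]
  simp

theorem find_go_at (l : List Char) (k : Nat) :
    PySem.Chars.find.go ['@'] l k
      = (match sfind l with | none => (-1 : Int) | some i => ((k + i : Nat) : Int)) := by
  induction l generalizing k with
  | nil => simp [PySem.Chars.find.go, sfind]
  | cons c t ih =>
    rw [PySem.Chars.find.go]
    by_cases hc : c = '@'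
    · subst hc
      rw [if_pos (by simp [List.isPrefixOf])]
      simp [sfind]
    · rw [if_neg (by simp [List.isPrefixOf]; exact Ne.symm hc)]
      rw [ih]
      simp only [sfind, if_neg hc]
      cases sfind t with
      | none => simp
      | some i => simp; push_cast; ring

theorem find_eq_sfind (s : List Char) :
    PySem.Chars.find s ['@'] = (match sfind s with | none => (-1 : Int) | some i => (i : Int)) := by
  rw [PySem.Chars.find, find_go_at]
  cases sfind s with
  | none => simp
  | some i => simp

theorem pyGet_neg_one {α : Type} (l : List α) (h : l ≠ []) :
    PySem.List.pyGet? l (-1) = l.getLast? := by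
  have hl : 0 < l.length := List.length_pos_iff.mpr h
  unfold PySem.List.pyGet? PySem.List.pyIdx?
  rw [if_neg (by omega), if_pos (by omega)]
  rw [List.getLast?_eq_getElem?]
  simp

theorem ofList_singleton_eq_at (c : Char) : (String.ofList [c] = "@") ↔ c = '@' := by
  rw [show ("@" : String) = String.ofList ['@'] from rfl, String.ofList_inj]
  simp

theorem findInRow_eq (r : List Char) (x0 : Nat) :
    pvFindInRow (r.map (fun c => String.ofList [c])) x0 = (sfind r).map (· + x0) := by
  induction r generalizing x0 with
  | nil => simp [pvFindInRow, sfind]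
  | cons c t ih =>
    simp only [List.map_cons, pvFindInRow, sfind]
    by_cases hc : c = '@'
    · subst hc; simp
    · rw [if_neg (by simpa [ofList_singleton_eq_at] using hc), if_neg hc, ih]
      cases sfind t <;> simp; omega

theorem findRobot_eq (rows : List (List Char)) (y0 : Nat) :
    pvFindRobot (strRows rows) y0 =
      match rowFind rows with
      | none => (strRows rows, none)
      | some (y, x) => ((strRows rows).modify y (fun r => r.set x "."), some (y0 + y, x)) := by
  induction rows generalizing y0 with
  | nil => simp [pvFindRobot, rowFind, strRows]
  | cons r rs ih =>
    simp only [strRows, List.map_cons, pvFindRobot]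
    rw [show (List.map (fun c => String.ofList [c]) r) = (r.map (fun c => String.ofList [c])) from rfl,
      findInRow_eq]
    cases hfr : sfind r with
    | some x =>
      simp only [Option.map_some, rowFind, hfr]
      simp [strRows, List.modify]
    | none =>
      simp only [Option.map_none, rowFind, hfr]
      rw [show (List.map (List.map fun c => String.ofList [c]) rs) = strRows rs from rfl, ih]
      cases hrr : rowFind rs with
      | none => simp [strRows]
      | some p =>
        obtain ⟨y, x⟩ := p
        simp [strRows, List.modify_cons]
        omega

theorem srows_cons_nl (t : List Char) : srows ('\n' :: t) = [] :: srows t := by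
  simp [srows]

theorem srows_cons_other (c : Char) (t : List Char) (hc : c ≠ '\n') (r : List Char)
    (rs : List (List Char)) (hr : srows t = r :: rs) : srows (c :: t) = (c :: r) :: rs := by
  simp [srows, hc, hr]

theorem sfind_cons_other (c : Char) (t : List Char) (hc : c ≠ '@') :
    sfind (c :: t) = (sfind t).map (· + 1) := by
  simp [sfind, hc]

theorem getLast?_cons_of_ne_nil {α : Type} (a : α) (l : List α) (h : l ≠ []) :
    (a :: l).getLast? = l.getLast? := by
  cases l with
  | nil => exact absurd rfl h
  | cons b m => exact List.getLast?_cons_cons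

theorem gloc_nl (t : List Char) (i : Nat) :
    gloc ('\n' :: t) (i + 1) = ((gloc t i).1 + 1, (gloc t i).2) := by
  unfold gloc
  refine Prod.ext ?_ ?_
  · simp [List.count_cons]
  · simp only [List.take_succ_cons]
    rw [srows_cons_nl, getLast?_cons_of_ne_nil _ _ (srows_ne_nil _)]

theorem gloc_other_not_mem (c : Char) (t : List Char) (i : Nat) (hc : c ≠ '\n')
    (h0 : '\n' ∉ t.take i) :
    gloc (c :: t) (i + 1) = (0, (gloc t i).2 + 1) := by
  unfold gloc
  have hsr : srows (t.take i) = [t.take i] := srows_no_newline _ h0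
  refine Prod.ext ?_ ?_
  · simp only [List.take_succ_cons, List.count_cons]
    rw [List.count_eq_zero.mpr h0]
    simp [hc]
  · simp only [List.take_succ_cons]
    rw [srows_cons_other c _ hc _ _ hsr, hsr]
    simp

theorem gloc_other_mem (c : Char) (t : List Char) (i : Nat) (hc : c ≠ '\n')
    (h1 : '\n' ∈ t.take i) :
    gloc (c :: t) (i + 1) = gloc t i := by
  unfold gloc
  cases hsr : srows (t.take i) with
  | nil => exact absurd hsr (srows_ne_nil _)
  | cons r' rs' =>
    have hlen : (srows (t.take i)).length = (t.take i).count '\n' + 1 := srows_length _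
    have hc1 : 0 < (t.take i).count '\n' := List.count_pos_iff.mpr h1
    have hne : rs' ≠ [] := by
      intro hnil
      rw [hsr, hnil] at hlen
      simp at hlen
      omega
    refine Prod.ext ?_ ?_
    · simp [List.count_cons, hc]
    · simp only [List.take_succ_cons]
      rw [srows_cons_other c _ hc _ _ hsr]
      rw [getLast?_cons_of_ne_nil _ _ hne, getLast?_cons_of_ne_nil _ _ hne]

theorem rowFind_srows (s : List Char) :
    rowFind (srows s) = (sfind s).map (gloc s) := by
  induction s with
  | nil => simp [srows, rowFind, sfind]
  | cons c t ih =>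
    by_cases hc : c = '\n'
    · subst hc
      rw [srows_cons_nl, sfind_cons_other _ _ (by decide)]
      simp only [rowFind, sfind]
      rw [ih, Option.map_map, Option.map_map]
      cases ht : sfind t with
      | none => simp
      | some i =>
        simp only [Option.map_some, Function.comp_apply]
        rw [gloc_nl]
    · cases hr : srows t with
      | nil => exact absurd hr (srows_ne_nil t)
      | cons r rs =>
        rw [srows_cons_other c t hc r rs hr]
        by_cases hca : c = '@'
        · subst hca
          simp [rowFind, sfind, gloc, srows]
        · rw [sfind_cons_other c t hca]
          simp only [rowFind, sfind_cons_other c r hca]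
          cases hfr : sfind r with
          | some x =>
            simp only [Option.map_some]
            have ihr : rowFind (r :: rs) = (sfind t).map (gloc t) := by rw [← hr, ih]
            rw [rowFind, hfr] at ihr
            cases ht : sfind t with
            | none => rw [ht] at ihr; simp at ihr
            | some i =>
              rw [ht] at ihr
              simp only [Option.map_some, Option.some.injEq] at ihr
              have h0 : '\n' ∉ t.take i := by
                have : (t.take i).count '\n' = 0 := by
                  have := congrArg Prod.fst ihr
                  simpa [gloc] using this.symm
                exact List.count_eq_zero.mp this
              have hx : (gloc t i).2 = x := (congrArg Prod.snd ihr).symm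
              simp only [Option.map_some]
              rw [gloc_other_not_mem c t i hc h0, hx]
          | none =>
            simp only [Option.map_none]
            have ihr : rowFind (r :: rs) = (sfind t).map (gloc t) := by rw [← hr, ih]
            simp only [rowFind, hfr] at ihr
            rw [ihr, Option.map_map]
            cases ht : sfind t with
            | none => simp
            | some i =>
              simp only [Option.map_some, Function.comp_apply]
              have h1 : '\n' ∈ t.take i := by
                rw [ht] at ihr
                cases hrr : rowFind rs with
                | none => rw [hrr] at ihr; simp at ihr
                | some p =>
                  rw [hrr] at ihr
                  simp only [Option.map_some, Option.some.injEq] at ihr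
                  have : p.1 + 1 = (gloc t i).1 := by
                    have := congrArg Prod.fst ihr; simpa using this
                  have hcp : 0 < (t.take i).count '\n' := by
                    have h2 : (gloc t i).1 = (t.take i).count '\n' := rfl
                    omega
                  exact List.count_pos_iff.mp hcp
              rw [gloc_other_mem c t i hc h1]

-- ===== VERDICT (by name: the statement is the Claim_ definition above) =====
theorem parse_spec : Claim_equal_parse := by
  intro input hdom hpre
  unfold Spec_parse parse parse_alt
  unfold Pre_parse at hpre
  obtain ⟨a, b, hab⟩ : ∃ a b, PySem.Chars.splitOn input.toList ['\n', '\n'] = [a, b] := by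
    cases hp : PySem.Chars.splitOn input.toList ['\n', '\n'] with
    | nil => rw [hp] at hpre; simp at hpre
    | cons x l =>
      cases l with
      | nil => rw [hp] at hpre; simp at hpre
      | cons y m =>
        cases m with
        | nil => exact ⟨x, y, rfl⟩
        | cons z n => rw [hp] at hpre; simp at hpre
  rw [hab]
  rw [if_pos (show ([a, b] : List (List Char)).length = 2 by simp)]
  simp only [List.headI, List.drop_succ_cons, List.drop_zero]
  rw [splitOn_eq_srows,
    show ((srows a).map fun line => line.map fun c => String.ofList [c]) = strRows (srows a)
      from rfl,
    findRobot_eq, rowFind_srows, find_eq_sfind]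
  cases hf : sfind a with
  | none => simp
  | some i =>
    simp only [Option.map_some]
    rw [if_neg (show ¬((((i : Nat) : Int) == -1) = true) by simp only [beq_iff_eq]; omega)]
    rw [PySem.Chars.slice_eq_listSlice, PySem.List.slice_to _ (by omega : (0 : Int) ≤ (i : Int))]
    rw [Int.toNat_natCast, count_newline, splitOn_eq_srows, pyGet_neg_one _ (srows_ne_nil _)]
    simp [gloc, strRows]
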